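-- pv_equiv track=rewrite | github.com/sibyllinesoft/scribe | packrepo/packer/chunker/chunker.py | _extract_module_docstring
-- ===== SOURCE A (Python) =====
-- from typing import List, Dict, Set, Optional, Tuple
--
-- def _extract_module_docstring(content: str, language: str) -> Optional[str]:
--     """Extract module-level docstring."""
--     if language == 'python':
--         lines = content.splitlines()
--         # Skip imports and comments to find module docstring
--         in_docstring = False
--         docstring_lines = []
--         quote_type = None
--
--         for line in lines:
--             stripped = line.strip()
--
--             if not stripped or stripped.startswith('#'):
--                 continue
--             elif stripped.startswith('"""') or stripped.startswith("'''"):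
--                 if not in_docstring:
--                     quote_type = '"""' if stripped.startswith('"""') else "'''"
--                     in_docstring = True
--                     docstring_lines.append(line)
--                     if stripped.count(quote_type) >= 2:  # Single line docstring
--                         break
--                 else:
--                     docstring_lines.append(line)
--                     break
--             elif in_docstring:
--                 docstring_lines.append(line)
--             else:
--                 # Hit non-docstring code
--                 break
--
--         if docstring_lines:
--             return '\n'.join(docstring_lines)
--
--     return None
-- ===== SOURCE B (Python) =====
-- def _extract_module_docstring(content, language):
--     """Extract module-level docstring (filter-once, then index-search and slice)."""
--     if language != 'python':
--         return None
--     # Single filtering pass: the answer depends only on the significant lines,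
--     # because A skips blank/comment lines both before and inside the docstring.
--     sig = [ln for ln in content.splitlines()
--            if ln.strip() and not ln.strip().startswith('#')]
--     if not sig:
--         return None
--     head = sig[0].strip()
--     quote = '"""' if head.startswith('"""') else "'''" if head.startswith("'''") else None
--     if quote is None:
--         return None
--     if head.count(quote) >= 2:
--         return sig[0]
--     # index of the closing line (inclusive), defaulting to the last line
--     end = next((i for i, ln in enumerate(sig[1:], 1)
--                 if ln.strip().startswith('"""') or ln.strip().startswith("'''")),
--                len(sig) - 1)
--     return '\n'.join(sig[:end + 1])
-- ===== Notes on version B (the rewrite author's own statement) =====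
-- stated objective: alternative
-- what changed: B replaces A's single stateful collection loop (in_docstring flag, quote_type, break) by filter-once-then-slice: one comprehension keeping significant lines, a head inspection, an index search for the closing line and a slice+join; correctness rests on the fact that A drops blank/comment lines uniformly, so its result is a contiguous slice of the filtered list.
import Mathlib
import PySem

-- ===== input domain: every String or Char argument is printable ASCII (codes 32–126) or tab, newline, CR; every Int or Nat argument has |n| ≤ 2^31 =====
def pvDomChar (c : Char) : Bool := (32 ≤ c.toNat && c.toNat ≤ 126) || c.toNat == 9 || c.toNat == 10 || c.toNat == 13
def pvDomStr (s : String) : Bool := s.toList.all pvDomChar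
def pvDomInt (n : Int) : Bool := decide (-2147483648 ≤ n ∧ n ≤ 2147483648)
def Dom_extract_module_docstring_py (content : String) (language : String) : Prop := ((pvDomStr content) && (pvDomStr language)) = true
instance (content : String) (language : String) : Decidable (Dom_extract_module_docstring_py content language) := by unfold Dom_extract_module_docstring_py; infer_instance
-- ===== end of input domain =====

-- ===== PORT A =====
-- B is an alternative decomposition (filter once, then index-search and slice); same values everywhere.
-- Port of A's for-loop with break: recursion over the lines with state (in_docstring, docstring_lines).
-- quote_type is only read in the iteration that sets it, so it is a local let there.
def pvLoopA : List String → Bool → List String → List String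
  | [], _, acc => acc
  | l :: rest, ind, acc =>
    let stripped := PySem.Str.strip l
    if stripped = "" || PySem.Str.startswith stripped "#" then
      pvLoopA rest ind acc
    else if PySem.Str.startswith stripped "\"\"\"" || PySem.Str.startswith stripped "'''" then
      if !ind then
        let quote_type := if PySem.Str.startswith stripped "\"\"\"" then "\"\"\"" else "'''"
        let acc' := acc ++ [l]
        if PySem.Str.count stripped quote_type ≥ 2 then acc'
        else pvLoopA rest true acc'
      else acc ++ [l]
    else if ind then pvLoopA rest ind (acc ++ [l])
    else acc

def extract_module_docstring_py (content : String) (language : String) : Option String :=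
  if language = "python" then
    let docstring_lines := pvLoopA (PySem.Str.splitlines content) false []
    if docstring_lines ≠ [] then some (PySem.Str.join "\n" docstring_lines) else none
  else none

-- ===== PORT B =====
-- a significant line: strip() nonempty and not a '#' comment
def pvIsSig (l : String) : Bool :=
  !(PySem.Str.strip l = "" || PySem.Str.startswith (PySem.Str.strip l) "#")

-- a line whose stripped form opens with either triple-quote style
def pvIsCloser (l : String) : Bool :=
  PySem.Str.startswith (PySem.Str.strip l) "\"\"\"" || PySem.Str.startswith (PySem.Str.strip l) "'''"

-- Source B's 'next(..., len(sig)-1)' index search followed by the slice sig[:end+1],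
-- expressed on the tail: take through the first closer, or everything if none.
def pvTakeThrough (ls : List String) : List String :=
  match List.findIdx? pvIsCloser ls with
  | some j => ls.take (j + 1)
  | none => ls

def extract_module_docstring_py_alt (content : String) (language : String) : Option String :=
  if language ≠ "python" then none
  else
    match (PySem.Str.splitlines content).filter pvIsSig with
    | [] => none
    | first :: rest =>
      let head := PySem.Str.strip first
      if PySem.Str.startswith head "\"\"\"" then
        if PySem.Str.count head "\"\"\"" ≥ 2 then some first
        else some (PySem.Str.join "\n" (first :: pvTakeThrough rest))
      else if PySem.Str.startswith head "'''" then
        if PySem.Str.count head "'''" ≥ 2 then some first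
        else some (PySem.Str.join "\n" (first :: pvTakeThrough rest))
      else none

-- ===== PRECONDITION & SPEC =====
def Spec_extract_module_docstring_py (content : String) (language : String) (out : Option String) : Prop := out = extract_module_docstring_py_alt content language
instance (content : String) (language : String) (out : Option String) : Decidable (Spec_extract_module_docstring_py content language out) := by unfold Spec_extract_module_docstring_py; infer_instance

-- ===== CLAIM (what is proved, stated in full; the proofs are below) =====
def Claim_equal_extract_module_docstring_py : Prop := ∀ (content : String) (language : String), Dom_extract_module_docstring_py content language → Spec_extract_module_docstring_py content language (extract_module_docstring_py content language)

-- ===== LEMMAS AND PROOFS =====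

theorem pvTakeThrough_cons_closer (l : String) (ls : List String) (h : pvIsCloser l = true) :
    pvTakeThrough (l :: ls) = [l] := by
  simp [pvTakeThrough, List.findIdx?_cons, h]

theorem pvTakeThrough_cons_body (l : String) (ls : List String) (h : pvIsCloser l = false) :
    pvTakeThrough (l :: ls) = l :: pvTakeThrough ls := by
  simp only [pvTakeThrough, List.findIdx?_cons, h, Bool.false_eq_true, if_false]
  cases hf : List.findIdx? pvIsCloser ls <;> simp [List.take_succ_cons]

-- A's in-docstring phase collects exactly the filtered lines through the first closer
theorem pvLoopA_true (ls : List String) (acc : List String) :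
    pvLoopA ls true acc = acc ++ pvTakeThrough (ls.filter pvIsSig) := by
  induction ls generalizing acc with
  | nil => simp [pvLoopA, pvTakeThrough]
  | cons l rest ih =>
    simp only [pvLoopA]
    cases hskip : (decide (PySem.Str.strip l = "") || PySem.Str.startswith (PySem.Str.strip l) "#") with
    | true =>
      have hsigF : ¬ pvIsSig l = true := by simp only [pvIsSig, hskip]; simp
      rw [List.filter_cons_of_neg hsigF]
      simpa using ih acc
    | false =>
      have hsigT : pvIsSig l = true := by simp only [pvIsSig, hskip]; rfl
      rw [List.filter_cons_of_pos hsigT]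
      cases hcl : (PySem.Str.startswith (PySem.Str.strip l) "\"\"\"" || PySem.Str.startswith (PySem.Str.strip l) "'''") with
      | true =>
        rw [pvTakeThrough_cons_closer l _ (by simp only [pvIsCloser]; exact hcl)]
        simp
      | false =>
        rw [pvTakeThrough_cons_body l _ (by simp only [pvIsCloser]; exact hcl)]
        simp [ih]

theorem pvJoin_singleton (l : String) : PySem.Str.join "\n" [l] = l := by
  simp [PySem.Str.join, PySem.Chars.join_singleton]

-- the core equivalence, on the list of lines
theorem pvMain (ls : List String) :
    (if pvLoopA ls false [] ≠ [] then some (PySem.Str.join "\n" (pvLoopA ls false [])) else none)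
    = (match ls.filter pvIsSig with
       | [] => none
       | first :: rest =>
         let head := PySem.Str.strip first
         if PySem.Str.startswith head "\"\"\"" then
           if PySem.Str.count head "\"\"\"" ≥ 2 then some first
           else some (PySem.Str.join "\n" (first :: pvTakeThrough rest))
         else if PySem.Str.startswith head "'''" then
           if PySem.Str.count head "'''" ≥ 2 then some first
           else some (PySem.Str.join "\n" (first :: pvTakeThrough rest))
         else none) := by
  induction ls with
  | nil => rfl
  | cons l rest ih =>
    simp only [pvLoopA]
    cases hskip : (decide (PySem.Str.strip l = "") || PySem.Str.startswith (PySem.Str.strip l) "#") with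
    | true =>
      have hsigF : ¬ pvIsSig l = true := by simp only [pvIsSig, hskip]; simp
      rw [List.filter_cons_of_neg hsigF]
      simpa using ih
    | false =>
      have hsigT : pvIsSig l = true := by simp only [pvIsSig, hskip]; rfl
      rw [List.filter_cons_of_pos hsigT]
      by_cases hd : PySem.Chars.startswith (PySem.Chars.strip l.toList) ['\"', '\"', '\"'] = true
      · by_cases hc : 2 ≤ PySem.Chars.count (PySem.Chars.strip l.toList) ['\"', '\"', '\"']
        · simp [hd, hc, pvJoin_singleton]
        · simp [hd, hc, pvLoopA_true]
      · by_cases hq : PySem.Chars.startswith (PySem.Chars.strip l.toList) ['\'', '\'', '\''] = true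
        · by_cases hc : 2 ≤ PySem.Chars.count (PySem.Chars.strip l.toList) ['\'', '\'', '\'']
          · simp [hd, hq, hc, pvJoin_singleton]
          · simp [hd, hq, hc, pvLoopA_true]
        · simp [hd, hq]

-- ===== VERDICT (by name: the statement is the Claim_ definition above) =====
theorem extract_module_docstring_py_spec : Claim_equal_extract_module_docstring_py := by
  intro content language _
  unfold Spec_extract_module_docstring_py extract_module_docstring_py extract_module_docstring_py_alt
  by_cases hl : language = "python"
  · simp only [hl, if_true, ne_eq, not_true_eq_false, if_false]
    exact pvMain (PySem.Str.splitlines content)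
  · simp [hl]
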